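-- pv_equiv track=rewrite | github.com/MSKose/Codewars | 7 kyu/Upper <body> Strength.py | alex_mistakes
-- ===== SOURCE A (Python) =====
-- def alex_mistakes(number_of_katas, time_limit):
--     minutes_per_kata = 6
--     pushup_time = 5
--     pushup_count = 0
--
--     while number_of_katas * minutes_per_kata + pushup_time <= time_limit:
--         pushup_count += 1
--         time_limit -= pushup_time
--         pushup_time *= 2
--
--     return pushup_count
-- ===== SOURCE B (Python) =====
-- def alex_mistakes(number_of_katas, time_limit):
--     # margin//10 = largest q with 10*q <= time budget after subtracting kata time (+5)
--     q = (time_limit - 6 * number_of_katas + 5) // 10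
--     return q.bit_length() if q > 0 else 0
-- ===== Notes on version B (the rewrite author's own statement) =====
-- stated objective: simpler
-- what changed: Replaces A's doubling while-loop by a closed form: q = (time_limit - 6*katas + 5)//10 and the answer is q.bit_length() when q > 0 else 0.
import Mathlib
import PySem

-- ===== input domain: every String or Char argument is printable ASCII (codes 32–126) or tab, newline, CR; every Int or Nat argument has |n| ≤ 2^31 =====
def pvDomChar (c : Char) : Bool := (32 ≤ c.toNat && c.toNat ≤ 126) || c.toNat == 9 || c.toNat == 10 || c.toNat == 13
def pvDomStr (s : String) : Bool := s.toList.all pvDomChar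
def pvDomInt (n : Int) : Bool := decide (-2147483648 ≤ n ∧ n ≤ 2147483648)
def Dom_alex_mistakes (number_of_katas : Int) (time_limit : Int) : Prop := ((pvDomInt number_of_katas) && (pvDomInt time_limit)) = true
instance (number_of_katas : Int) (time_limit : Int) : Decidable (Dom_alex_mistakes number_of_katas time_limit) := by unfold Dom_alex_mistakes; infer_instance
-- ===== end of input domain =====

-- B computes A's pushup count by a closed form (floor-division + bit_length) instead of A's doubling loop.
-- ===== PORT A =====
-- the while-loop of A: state (time_limit, pushup_time, pushup_count); 0 < pushup_time justifies termination
def alexLoop (number_of_katas time_limit pushup_time pushup_count : Int) (hp : 0 < pushup_time) : Int :=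
  if h : number_of_katas * 6 + pushup_time ≤ time_limit then
    alexLoop number_of_katas (time_limit - pushup_time) (pushup_time * 2) (pushup_count + 1) (by omega)
  else
    pushup_count
termination_by (time_limit - number_of_katas * 6 - pushup_time + 1).toNat
decreasing_by omega

def alex_mistakes (number_of_katas : Int) (time_limit : Int) : Int :=
  alexLoop number_of_katas time_limit 5 0 (by norm_num)

-- ===== PORT B =====
def alex_mistakes_alt (number_of_katas : Int) (time_limit : Int) : Int :=
  let q := PySem.Int.floordiv (time_limit - 6 * number_of_katas + 5) 10
  if 0 < q then (PySem.Int.bitLength q : Int) else 0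

-- ===== PRECONDITION & SPEC =====
def Spec_alex_mistakes (number_of_katas : Int) (time_limit : Int) (out : Int) : Prop := out = alex_mistakes_alt number_of_katas time_limit
instance (number_of_katas : Int) (time_limit : Int) (out : Int) : Decidable (Spec_alex_mistakes number_of_katas time_limit out) := by unfold Spec_alex_mistakes; infer_instance

-- ===== CLAIM (what is proved, stated in full; the proofs are below) =====
def Claim_equal_alex_mistakes : Prop := ∀ (number_of_katas : Int) (time_limit : Int), Dom_alex_mistakes number_of_katas time_limit → Spec_alex_mistakes number_of_katas time_limit (alex_mistakes number_of_katas time_limit)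

-- ===== LEMMAS AND PROOFS =====

-- floor division composes for positive divisors
lemma fdiv_fdiv_two (M p : Int) (hp : 0 < p) :
    PySem.Int.floordiv (PySem.Int.floordiv M (2 * p)) 2 = PySem.Int.floordiv M (4 * p) := by
  have h1 := (PySem.Int.floordiv_eq_iff_of_pos (a := M) (b := 2 * p) (by omega)).mp rfl
  have h2 := (PySem.Int.floordiv_eq_iff_of_pos
    (a := PySem.Int.floordiv M (2 * p)) (b := 2) (by omega)).mp rfl
  set q := PySem.Int.floordiv M (2 * p) with hq
  set r := PySem.Int.floordiv q 2 with hr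
  symm
  rw [PySem.Int.floordiv_eq_iff_of_pos (by omega)]
  constructor
  · nlinarith [h1.1, h2.1]
  · nlinarith [h1.2, h2.2]

-- invariant of A's loop: its remaining count is bit_length of (budget margin) // (2*pushup_time)
lemma alexLoop_closed (k T p c : Int) (hp : 0 < p) :
    alexLoop k T p c hp =
      c + (if 0 < PySem.Int.floordiv (T - 6 * k + p) (2 * p) then
             (PySem.Int.bitLength (PySem.Int.floordiv (T - 6 * k + p) (2 * p)) : Int) else 0) := by
  induction T, p, c, hp using alexLoop.induct k with
  | case1 T p c hp h ih =>
    rw [alexLoop, dif_pos h, ih]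
    have hM : (T - p) - 6 * k + p * 2 = T - 6 * k + p := by ring
    have hq : 2 * p ≤ T - 6 * k + p := by omega
    set M := T - 6 * k + p with hMdef
    have hqpos : 0 < PySem.Int.floordiv M (2 * p) := by
      rw [show (0 : Int) < PySem.Int.floordiv M (2 * p) ↔ 1 ≤ PySem.Int.floordiv M (2 * p) from by omega,
          PySem.Int.le_floordiv_iff_mul_le (by omega)]
      omega
    have hcomp : PySem.Int.floordiv M (2 * (p * 2)) = PySem.Int.floordiv (PySem.Int.floordiv M (2 * p)) 2 := by
      rw [fdiv_fdiv_two M p hp]; ring_nf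
    have hq2nonneg : 0 ≤ PySem.Int.floordiv (PySem.Int.floordiv M (2 * p)) 2 := by
      rw [show (0:Int) ≤ PySem.Int.floordiv (PySem.Int.floordiv M (2 * p)) 2 ↔
            (0:Int) * 2 ≤ PySem.Int.floordiv M (2 * p) from
          by rw [PySem.Int.le_floordiv_iff_mul_le (by omega)]]
      omega
    rw [hM, if_pos hqpos, hcomp]
    have hBL := PySem.Int.bitLength_of_pos hqpos
    rcases lt_or_eq_of_le hq2nonneg with h2 | h2
    · rw [if_pos h2, hBL]; push_cast; ring
    · rw [if_neg (by omega), hBL, ← h2, PySem.Int.bitLength_zero]; push_cast; ring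
  | case2 T p c hp h =>
    rw [alexLoop, dif_neg h]
    have : ¬ 0 < PySem.Int.floordiv (T - 6 * k + p) (2 * p) := by
      rw [show (0 : Int) < PySem.Int.floordiv (T - 6 * k + p) (2 * p) ↔
            1 ≤ PySem.Int.floordiv (T - 6 * k + p) (2 * p) from by omega,
          PySem.Int.le_floordiv_iff_mul_le (by omega)]
      omega
    rw [if_neg this]; ring

-- ===== VERDICT (by name: the statement is the Claim_ definition above) =====
theorem alex_mistakes_spec : Claim_equal_alex_mistakes := by
  intro k T _
  show alex_mistakes k T = alex_mistakes_alt k T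
  rw [alex_mistakes, alexLoop_closed, alex_mistakes_alt]
  norm_num
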